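-- pv_equiv track=rewrite | github.com/123456yyz412/zkar_gyl_public | SalesTargets/test/sale_targets_test.py | gradient_allocation
-- ===== SOURCE A (Python) =====
-- def gradient_allocation(x, y):
--     """
--     梯度下降分配，如[2, 2, 2, 2, 1, 1]
--     :param x: 分配对象数量
--     :param y: 可分配sku数量
--     :return:
--     """
--     result = [0] * x
--     # 先尽量给每个对象分配 1 个物品
--     for i in range(min(x, y)):
--         result[i] = 1
--     remaining = y - min(x, y)
--     index = 0
--     # 分配剩余物品
--     while remaining > 0:
--         result[index] += 1
--         remaining -= 1
--         index = (index + 1) % x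
--     # 从大到小排序
--     result.sort(reverse=True)
--     return result
-- ===== SOURCE B (Python) =====
-- def gradient_allocation(x, y):
--     if x <= 0:
--         return []
--     base, extra = divmod(max(y, 0), x)
--     return [base + 1] * extra + [base] * (x - extra)
-- ===== Notes on version B (the rewrite author's own statement) =====
-- stated objective: faster
-- what changed: B replaces A's one-by-one round-robin while-loop plus final sort by the closed form divmod(y, x): the first y%x slots get y//x+1 and the rest y//x, already in descending order.
import Mathlib
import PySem

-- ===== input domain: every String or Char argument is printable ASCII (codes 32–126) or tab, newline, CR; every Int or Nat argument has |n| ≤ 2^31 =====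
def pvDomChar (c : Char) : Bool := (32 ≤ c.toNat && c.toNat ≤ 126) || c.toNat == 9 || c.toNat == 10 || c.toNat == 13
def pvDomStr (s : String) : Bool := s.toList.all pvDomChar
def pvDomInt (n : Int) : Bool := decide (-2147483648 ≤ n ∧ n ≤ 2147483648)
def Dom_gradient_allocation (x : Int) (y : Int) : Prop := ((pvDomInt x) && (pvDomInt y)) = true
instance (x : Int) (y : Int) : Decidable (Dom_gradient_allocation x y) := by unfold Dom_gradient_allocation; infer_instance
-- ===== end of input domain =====

-- B replaces A's one-by-one round-robin distribution loop by the closed form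
-- base = y//x, extra = y%x: the first `extra` slots get base+1, the rest get base.


-- ===== PORT A =====
-- the 'while remaining > 0' loop: fuel = remaining.toNat (remaining drops by exactly 1 per
-- iteration); result[index] += 1 is pyGetD/pySetD (in range wherever A returns, i.e. under
-- Pre_); index = (index + 1) % x
def gaWhile (fuel : Nat) (x : Int) (result : List Int) (index : Int) : List Int :=
  match fuel with
  | 0 => result
  | n + 1 =>
      gaWhile n x (PySem.List.pySetD result index (PySem.List.pyGetD result index 0 + 1))
        (PySem.Int.mod (index + 1) x)

def gradient_allocation (x : Int) (y : Int) : List Int :=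
  -- result = [0] * x
  let result := PySem.List.pyRepeat [(0 : Int)] x
  -- for i in range(min(x, y)): result[i] = 1
  let result := (PySem.List.pyRange 0 (min x y) 1).foldl
    (fun r i => PySem.List.pySetD r i 1) result
  -- remaining = y - min(x, y); index = 0; while remaining > 0: …
  let remaining := y - min x y
  let result := gaWhile remaining.toNat x result 0
  -- result.sort(reverse=True)
  PySem.List.sorted result (fun v => v) true

-- ===== PORT B =====
def gradient_allocation_alt (x : Int) (y : Int) : List Int :=
  if x ≤ 0 then []
  else
    let base := PySem.Int.floordiv (max y 0) x
    let extra := PySem.Int.mod (max y 0) x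
    PySem.List.pyRepeat [base + 1] extra ++ PySem.List.pyRepeat [base] (x - extra)

-- ===== PRECONDITION & SPEC =====
-- Pre_ excludes exactly the inputs on which A raises (IndexError: x ≤ 0 with y > x leaves
-- remaining > 0 over a result list too short for the round-robin writes); B returns []
-- on those inputs.
def Pre_gradient_allocation (x : Int) (y : Int) : Prop := 0 < x ∨ y ≤ x
instance (x : Int) (y : Int) : Decidable (Pre_gradient_allocation x y) := by
  unfold Pre_gradient_allocation; infer_instance
def pvWitness_gradient_allocation : Int × Int := (4, 10)

def Spec_gradient_allocation (x : Int) (y : Int) (out : List Int) : Prop :=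
  out = gradient_allocation_alt x y
instance (x : Int) (y : Int) (out : List Int) : Decidable (Spec_gradient_allocation x y out) := by
  unfold Spec_gradient_allocation; infer_instance

-- ===== CLAIM (what is proved, stated in full; the proofs are below) =====
def Claim_equal_gradient_allocation : Prop := ∀ (x : Int) (y : Int),
  Dom_gradient_allocation x y → Pre_gradient_allocation x y →
  Spec_gradient_allocation x y (gradient_allocation x y)

-- ===== LEMMAS AND PROOFS =====

theorem gaWhile_succ (f : Nat) (x : Int) (l : List Int) (i : Int) :
    gaWhile (f + 1) x l i = gaWhile f x
      (PySem.List.pySetD l i (PySem.List.pyGetD l i 0 + 1)) (PySem.Int.mod (i + 1) x) := rfl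

-- empty range for a non-positive stop
theorem pyRange_nonpos (y : Int) (h : y ≤ 0) : PySem.List.pyRange 0 y 1 = [] := by
  simp [PySem.List.pyRange]; omega

-- phase 1: setting result[i] = 1 for i in range(m), over any list l with m ≤ l.length
theorem setfold (m : Nat) (l : List Int) (h : m ≤ l.length) :
    (List.range m).foldl (fun r i => r.set i 1) l = List.replicate m 1 ++ l.drop m := by
  induction m with
  | zero => simp
  | succ m ih =>
    rw [List.range_succ, List.foldl_append, ih (by omega)]
    simp only [List.foldl_cons, List.foldl_nil]
    rw [List.set_append_right _ _ (by simp)]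
    have hd : l.drop m = l[m]! :: l.drop (m+1) := by
      rw [getElem!_pos l m (by omega)]
      exact (List.getElem_cons_drop (by omega)).symm
    rw [hd]
    simp [List.replicate_succ' (n := m)]

-- a full round of the while loop adds 1 to every remaining slot and returns the index to 0
theorem walk (n : Nat) (_hn : 0 < n) (m : Nat) :
    ∀ (k i : Nat) (l : List Int), l.length = n → i + k = n → 1 ≤ k →
    gaWhile (k + m) (↑n) l (↑i) =
      gaWhile m (↑n) (l.take i ++ (l.drop i).map (· + 1)) 0 := by
  intro k
  induction k with
  | zero => omega
  | succ k ih =>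
    intro i l hl hik _
    have hi : i < l.length := by omega
    have hiv : l.getD i 0 = l[i]'hi := List.getD_eq_getElem l 0 hi
    rw [show k + 1 + m = (k + m) + 1 by omega, gaWhile_succ,
      show (↑i : Int) + 1 = ((i + 1 : Nat) : Int) by push_cast; ring,
      PySem.Int.mod_natCast, PySem.List.pySetD_natCast, PySem.List.pyGetD_natCast, hiv,
      List.set_eq_take_cons_drop _ hi]
    have hdrop : l.drop i = (l[i]'hi) :: l.drop (i + 1) := List.drop_eq_getElem_cons hi
    cases Nat.eq_or_lt_of_le (Nat.succ_le_of_lt (show i < n by omega)) with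
    | inl hin =>
      have hk0 : k = 0 := by omega
      subst hk0
      rw [show (i + 1) % n = 0 by rw [show i + 1 = n by omega]; exact Nat.mod_self n]
      show gaWhile (0 + m) (↑n) _ _ = _
      rw [Nat.zero_add]
      congr 1
      rw [hdrop, show l.drop (i + 1) = [] from List.drop_eq_nil_of_le (by omega)]
      simp
    | inr hin =>
      rw [show (i + 1) % n = i + 1 from Nat.mod_eq_of_lt hin,
        ih (i + 1) _ (by simp; omega) (by omega) (by omega)]
      congr 1
      have hlen : (l.take i).length = i := by simp; omega
      rw [show l.take i ++ (l[i]'hi + 1) :: l.drop (i + 1)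
            = (l.take i ++ [l[i]'hi + 1]) ++ l.drop (i + 1) by simp]
      have hlen2 : (l.take i ++ [l[i]'hi + 1]).length = i + 1 := by simp [hlen]
      rw [show i + 1 = (l.take i ++ [l[i]'hi + 1]).length + 0 by rw [hlen2],
        List.take_length_add_append, List.drop_length_add_append]
      rw [hdrop]
      simp [hlen2]
      rw [List.drop_eq_getElem_cons (show i < (List.map (fun x => x + 1) l).length by simpa using hi)]
      simp

-- q full rounds add q to every slot
theorem rounds (n : Nat) (_hn : 0 < n) (r : Nat) :
    ∀ (q : Nat) (l : List Int), l.length = n →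
    gaWhile (n * q + r) (↑n) l 0 = gaWhile r (↑n) (l.map (· + (q : Int))) 0 := by
  intro q
  induction q with
  | zero => intro l hl; simp
  | succ q ih =>
    intro l hl
    rw [show n * (q + 1) + r = n + (n * q + r) by ring]
    have hw := walk n (by omega) (n * q + r) n 0 l hl (by omega) (by omega)
    norm_num at hw
    rw [hw]
    rw [ih _ (by simpa using hl)]
    congr 1
    simp only [List.map_map]
    apply List.map_congr_left
    intro a _
    simp
    ring

-- a partial round adds 1 to exactly the next r slots
theorem partialRound (n : Nat) (hn : 0 < n) :
    ∀ (r : Nat) (i : Nat) (l : List Int), l.length = n → i + r ≤ n →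
    gaWhile r (↑n) l (↑i) =
      l.take i ++ ((l.drop i).take r).map (· + 1) ++ l.drop (i + r) := by
  intro r
  induction r with
  | zero => intro i l hl _; simp [gaWhile]
  | succ r ih =>
    intro i l hl hir
    have hi : i < l.length := by omega
    have hiv : l.getD i 0 = l[i]'hi := List.getD_eq_getElem l 0 hi
    rw [gaWhile_succ, show (↑i : Int) + 1 = ((i + 1 : Nat) : Int) by push_cast; ring,
      PySem.Int.mod_natCast, PySem.List.pySetD_natCast, PySem.List.pyGetD_natCast, hiv,
      List.set_eq_take_cons_drop _ hi]
    have hdrop : l.drop i = (l[i]'hi) :: l.drop (i + 1) := List.drop_eq_getElem_cons hi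
    cases Nat.eq_or_lt_of_le (show i + 1 ≤ n by omega) with
    | inl hin =>
      have hr0 : r = 0 := by omega
      subst hr0
      rw [show (i + 1) % n = 0 by rw [hin]; exact Nat.mod_self n]
      show List.take i l ++ (l[i]'hi + 1) :: l.drop (i + 1) = _
      rw [hdrop]
      simp
      rw [List.drop_eq_getElem_cons (show i < (List.map (fun x => x + 1) l).length by simpa using hi)]
      simp
    | inr hin =>
      rw [show (i + 1) % n = i + 1 from Nat.mod_eq_of_lt hin,
        ih (i + 1) _ (by simp; omega) (by omega)]
      have hlen2 : (List.take i l ++ [l[i]'hi + 1]).length = i + 1 := by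
        simp; omega
      rw [show List.take i l ++ (l[i]'hi + 1) :: l.drop (i + 1)
            = (List.take i l ++ [l[i]'hi + 1]) ++ l.drop (i + 1) by simp]
      rw [show i + 1 = (List.take i l ++ [l[i]'hi + 1]).length + 0 by rw [hlen2],
        List.take_length_add_append, List.drop_length_add_append]
      rw [show (List.take i l ++ [l[i]'hi + 1]).length + 0 + r
            = (List.take i l ++ [l[i]'hi + 1]).length + r by omega,
        List.drop_length_add_append]
      rw [hdrop]
      simp [hlen2, List.drop_drop, show i + (r + 1) = i + 1 + r by omega]
      rw [List.drop_eq_getElem_cons (show i < (List.map (fun x => x + 1) l).length by simpa using hi)]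
      simp

-- a weakly descending two-block list sorts (reverse=True) to itself
theorem sorted_two_block (a b : Int) (r s : Nat) (h : b ≤ a) :
    PySem.List.sorted (List.replicate r a ++ List.replicate s b) (fun v => v) true =
      List.replicate r a ++ List.replicate s b := by
  apply PySem.List.sorted_rev_eq_self_of_pairwise
  apply List.pairwise_append.2
  refine ⟨List.pairwise_replicate.2 ?_, List.pairwise_replicate.2 ?_, ?_⟩ <;> simp_all

-- ===== VERDICT (by name: the statement is the Claim_ definition above) =====
theorem gradient_allocation_spec : Claim_equal_gradient_allocation := by
  intro x y _ hpre
  unfold Spec_gradient_allocation gradient_allocation gradient_allocation_alt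
  by_cases hx : x ≤ 0
  · -- x ≤ 0, so (Pre_) y ≤ x ≤ 0: A builds [] and never loops; B returns []
    have hy : y ≤ x := hpre.resolve_left (by omega)
    rw [if_pos hx, min_eq_right hy, pyRange_nonpos y (by omega)]
    simp [PySem.List.pyRepeat_singleton, Int.toNat_of_nonpos hx, gaWhile,
      PySem.List.sorted]
  · -- 0 < x
    obtain ⟨n, rfl⟩ : ∃ n : Nat, x = ↑n := ⟨x.toNat, (Int.toNat_of_nonneg (by omega)).symm⟩
    have hn : 0 < n := by exact_mod_cast not_le.1 hx
    rw [if_neg hx]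
    have hl0 : PySem.List.pyRepeat [(0 : Int)] ↑n = List.replicate n 0 := by
      simp [PySem.List.pyRepeat_singleton]
    by_cases hy : y ≤ 0
    · -- 0 < x, y ≤ 0: empty range, remaining = 0; B: base = extra = 0
      rw [min_eq_right (by omega), pyRange_nonpos y hy]
      simp only [List.foldl_nil]
      rw [show y - y = ((0 : Nat) : Int) by ring, max_eq_right hy, hl0]
      have hb : PySem.Int.floordiv ((0 : Nat) : Int) ↑n = ((0 : Nat) : Int) := by
        rw [PySem.Int.floordiv_natCast]; simp
      have hm : PySem.Int.mod ((0 : Nat) : Int) ↑n = ((0 : Nat) : Int) := by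
        rw [PySem.Int.mod_natCast]; simp
      norm_num at hb hm ⊢
      rw [hb, hm]
      have := sorted_two_block 0 0 n 0 le_rfl
      simp at this
      simp [gaWhile, this]
    · -- 0 < x, 0 < y
      obtain ⟨yn, rfl⟩ : ∃ m : Nat, y = ↑m := ⟨y.toNat, (Int.toNat_of_nonneg (by omega)).symm⟩
      have hyn0 : 0 < yn := by exact_mod_cast not_le.1 hy
      rw [max_eq_left (by omega)]
      by_cases hle : yn ≤ n
      · -- y ≤ x : phase 1 only, remaining = 0
        rw [min_eq_right (by exact_mod_cast hle), PySem.List.pyRange_zero_natCast]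
        simp only [List.foldl_map, PySem.List.pySetD_natCast]
        rw [hl0, setfold yn (List.replicate n 0) (by simpa using hle),
          List.drop_replicate]
        rw [show (yn : Int) - (yn : Int) = 0 by ring]
        show PySem.List.sorted (gaWhile (0 : Int).toNat _ _ 0) _ true = _
        rw [show ((0 : Int)).toNat = 0 by rfl]
        rw [show gaWhile 0 (↑n) (List.replicate yn 1 ++ List.replicate (n - yn) 0) 0
              = List.replicate yn 1 ++ List.replicate (n - yn) 0 from rfl]
        rw [sorted_two_block 1 0 yn (n - yn) (by norm_num)]
        cases Nat.eq_or_lt_of_le hle with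
        | inl heq =>
          subst heq
          rw [show PySem.Int.floordiv ↑yn ↑yn = ((1 : Nat) : Int) by
              rw [PySem.Int.floordiv_natCast, Nat.div_self hyn0],
            show PySem.Int.mod ↑yn ↑yn = ((0 : Nat) : Int) by
              rw [PySem.Int.mod_natCast, Nat.mod_self]]
          simp [PySem.List.pyRepeat_singleton]
        | inr hlt =>
          rw [show PySem.Int.floordiv ↑yn ↑n = ((0 : Nat) : Int) by
              rw [PySem.Int.floordiv_natCast, Nat.div_eq_of_lt hlt],
            show PySem.Int.mod ↑yn ↑n = ((yn : Nat) : Int) by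
              rw [PySem.Int.mod_natCast, Nat.mod_eq_of_lt hlt]]
          rw [show (n : Int) - ((yn : Nat) : Int) = ((n - yn : Nat) : Int) by omega]
          simp [PySem.List.pyRepeat_singleton]
      · -- x < y : full + partial rounds
        have hlt : n < yn := by omega
        rw [min_eq_left (by exact_mod_cast le_of_lt hlt), PySem.List.pyRange_zero_natCast]
        simp only [List.foldl_map, PySem.List.pySetD_natCast]
        rw [hl0, setfold n (List.replicate n 0) (by simp), List.drop_replicate]
        simp only [Nat.sub_self, List.replicate_zero, List.append_nil]
        set k := yn - n with hk
        have hq : n * (k / n) + k % n = k := Nat.div_add_mod k n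
        rw [show (yn : Int) - (n : Int) = ((k : Nat) : Int) by omega,
          show ((k : Nat) : Int).toNat = k by simp,
          show k = n * (k / n) + k % n from hq.symm,
          rounds n hn (k % n) (k / n) (List.replicate n 1) (by simp)]
        rw [List.map_replicate]
        have hp := partialRound n hn (k % n) 0 (List.replicate n (1 + ((k / n : Nat) : Int)))
          (by simp) (by have := Nat.mod_lt k hn; omega)
        simp only [Nat.cast_zero, List.take_zero, List.drop_zero, List.nil_append,
          Nat.zero_add] at hp
        rw [hp]
        simp only [List.take_replicate, List.drop_replicate, List.map_replicate]
        rw [show min (k % n) n = k % n from min_eq_left (le_of_lt (Nat.mod_lt k hn))]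
        rw [sorted_two_block _ _ _ _ (by omega)]
        rw [show (yn : Int) = ((k + n : Nat) : Int) by push_cast; omega,
          PySem.Int.floordiv_natCast, PySem.Int.mod_natCast,
          Nat.add_div_right k hn, Nat.add_mod_right k n]
        rw [show (n : Int) - ((k % n : Nat) : Int) = ((n - k % n : Nat) : Int) by
            have := Nat.mod_lt k hn; push_cast; omega]
        simp [PySem.List.pyRepeat_singleton]
        rw [show ((k : Int) % (n : Int)).toNat = k % n by
            rw [← Int.natCast_mod]; exact Int.toNat_natCast _]
        ring_nf
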